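-- pv_equiv track=rewrite | github.com/ShuvalovAnthony/ez_python | Alexander/9/21408/21408.py | check
-- ===== SOURCE A (Python) =====
-- def check(row: list):
--     povtor = []
--     unique = []
--
--     for num in row:
--         if row.count(num) == 3:
--             povtor.append(num)
--         elif row.count(num) == 1:
--             unique.append(num)
--         else:
--             return False
--
--     if len(unique) != 1: return False
--     if len(povtor) != 6: return False
--
--     return max(povtor) > unique[0]
-- ===== SOURCE B (Python) =====
-- def check(row: list):
--     counts = {}
--     for num in row:
--         counts[num] = counts.get(num, 0) + 1
--
--     triples = []
--     singles = []
--     for v, c in counts.items():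
--         if c == 3:
--             triples.append(v)
--         elif c == 1:
--             singles.append(v)
--         else:
--             return False
--
--     if len(singles) != 1: return False
--     if len(triples) != 2: return False
--
--     return max(triples) > singles[0]
-- ===== Notes on version B (the rewrite author's own statement) =====
-- stated objective: alternative
-- what changed: A calls row.count(num) for every element (repeated full rescans); B builds a dict of multiplicities in one pass and classifies each distinct value once from the dict items, comparing max(triples) with the single value.
import Mathlib
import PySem

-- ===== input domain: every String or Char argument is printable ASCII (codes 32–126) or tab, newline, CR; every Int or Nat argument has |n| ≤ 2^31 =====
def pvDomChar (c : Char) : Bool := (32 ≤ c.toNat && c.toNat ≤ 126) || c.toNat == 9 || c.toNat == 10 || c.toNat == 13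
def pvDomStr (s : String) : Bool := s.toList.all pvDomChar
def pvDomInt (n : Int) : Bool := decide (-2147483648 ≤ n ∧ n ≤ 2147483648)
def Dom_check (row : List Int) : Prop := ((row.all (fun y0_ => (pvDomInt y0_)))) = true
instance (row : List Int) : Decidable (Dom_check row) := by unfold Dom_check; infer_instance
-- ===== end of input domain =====

-- B replaces A's per-element row.count scans by one counting pass over a dict followed by
-- one pass over its items (objective: alternative decomposition).

-- ===== PORT A =====
-- the code after A's loop: if len(unique)!=1 / len(povtor)!=6 return False; return max(povtor) > unique[0]
def checkFinish (povtor unique : List Int) : Bool :=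
  if unique.length ≠ 1 then false
  else if povtor.length ≠ 6 then false
  else match PySem.List.max? povtor (fun x => x), PySem.List.pyGet? unique 0 with
    | some m, some u => decide (m > u)
    | _, _ => false

-- A's 'for num in row' loop with its early 'return False'
def checkLoop (row : List Int) : List Int → List Int → List Int → Bool
  | [], povtor, unique => checkFinish povtor unique
  | num :: rest, povtor, unique =>
    if row.count num = 3 then checkLoop row rest (povtor ++ [num]) unique
    else if row.count num = 1 then checkLoop row rest povtor (unique ++ [num])
    else false

def check (row : List Int) : Bool := checkLoop row row [] []

-- ===== PORT B =====
-- B's 'for v, c in counts.items()' loop with its early 'return False', plus B's tail checks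
def checkAltLoop : List (Int × Int) → List Int → List Int → Bool
  | [], triples, singles =>
    if singles.length ≠ 1 then false
    else if triples.length ≠ 2 then false
    else match PySem.List.max? triples (fun x => x), PySem.List.pyGet? singles 0 with
      | some m, some s => decide (m > s)
      | _, _ => false
  | (v, c) :: rest, triples, singles =>
    if c = 3 then checkAltLoop rest (triples ++ [v]) singles
    else if c = 1 then checkAltLoop rest triples (singles ++ [v])
    else false

def check_alt (row : List Int) : Bool :=
  let counts := row.foldl (fun d x => d.insert x (d.getD x 0 + 1)) PySem.Dict.empty
  checkAltLoop counts.items [] []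

-- ===== PRECONDITION & SPEC =====
def Spec_check (row : List Int) (out : Bool) : Prop := out = check_alt row
instance (row : List Int) (out : Bool) : Decidable (Spec_check row out) := by unfold Spec_check; infer_instance

-- ===== CLAIM (what is proved, stated in full; the proofs are below) =====
def Claim_equal_check : Prop := ∀ (row : List Int), Dom_check row → Spec_check row (check row)

-- ===== LEMMAS AND PROOFS =====

-- the elements of row whose multiplicity is k form k copies of the distinct such values
theorem count_len (row : List Int) (k : Nat) :
    (row.filter (fun x => row.count x == k)).length
      = k * ((PySem.Set.ofList row).filter (fun x => row.count x == k)).length := by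
  classical
  have hfin : (row.filter (fun x => row.count x == k)).toFinset
      = ((PySem.Set.ofList row).filter (fun x => row.count x == k)).toFinset := by
    ext a
    simp [PySem.Set.mem_ofList]
  have h2 : ∀ a ∈ (row.filter (fun x => row.count x == k)).toFinset,
      (row.filter (fun x => row.count x == k)).count a = k := by
    intro a ha
    simp only [List.mem_toFinset, List.mem_filter, beq_iff_eq] at ha
    rw [List.count_filter (by simp [ha.2])]
    exact ha.2
  have hnd : ((PySem.Set.ofList row).filter (fun x => row.count x == k)).Nodup :=
    (PySem.Set.nodup_ofList row).filter _
  calc (row.filter (fun x => row.count x == k)).length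
      = ∑ a ∈ (row.filter (fun x => row.count x == k)).toFinset,
          (row.filter (fun x => row.count x == k)).count a :=
        (List.sum_toFinset_count_eq_length _).symm
    _ = ∑ _a ∈ ((PySem.Set.ofList row).filter (fun x => row.count x == k)).toFinset, k := by
        rw [hfin] at h2 ⊢; exact Finset.sum_congr rfl h2
    _ = k * ((PySem.Set.ofList row).filter (fun x => row.count x == k)).length := by
        rw [Finset.sum_const, List.toFinset_card_of_nodup hnd]; ring

-- max(l) depends only on the set of elements (Int, no key)
theorem max_eq_of_mem_iff (l1 l2 : List Int) (h : ∀ x, x ∈ l1 ↔ x ∈ l2) (h1 : l1 ≠ []) :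
    PySem.List.max? l1 (fun x => x) = PySem.List.max? l2 (fun x => x) := by
  have h2 : l2 ≠ [] := by
    cases l1 with
    | nil => exact absurd rfl h1
    | cons a t => intro hnil; have := (h a).mp (by simp); simp [hnil] at this
  cases hm1 : PySem.List.max? l1 (fun x => x) with
  | none => exact absurd ((PySem.List.max?_eq_none_iff _ _).mp hm1) h1
  | some m1 =>
    cases hm2 : PySem.List.max? l2 (fun x => x) with
    | none => exact absurd ((PySem.List.max?_eq_none_iff _ _).mp hm2) h2
    | some m2 =>
      have hle1 : m1 ≤ m2 := PySem.List.max?_isMax hm2 m1 ((h m1).mp (PySem.List.max?_mem hm1))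
      have hle2 : m2 ≤ m1 := PySem.List.max?_isMax hm1 m2 ((h m2).mpr (PySem.List.max?_mem hm2))
      simp [le_antisymm hle1 hle2]

theorem all_eq_of_mem_iff (l1 l2 : List Int) (p : Int → Bool) (h : ∀ x, x ∈ l1 ↔ x ∈ l2) :
    l1.all p = l2.all p := by
  apply Bool.eq_iff_iff.mpr
  simp only [List.all_eq_true]
  constructor
  · intro H x hx; exact H x ((h x).mpr hx)
  · intro H x hx; exact H x ((h x).mp hx)

-- A's loop = "all multiplicities are 3 or 1" plus the two filtered accumulators
theorem checkLoop_char (row : List Int) : ∀ (rest p u : List Int),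
    checkLoop row rest p u =
      if rest.all (fun x => row.count x == 3 || row.count x == 1)
      then checkFinish (p ++ rest.filter (fun x => row.count x == 3))
                       (u ++ rest.filter (fun x => row.count x == 1))
      else false := by
  intro rest
  induction rest with
  | nil => intro p u; simp [checkLoop]
  | cons num rest ih =>
    intro p u
    by_cases h3 : row.count num = 3
    · simp [checkLoop, h3, ih]
    · by_cases h1 : row.count num = 1
      · simp [checkLoop, h1, ih]
      · simp [checkLoop, h3, h1]

-- B's loop = "all stored counts are 3 or 1" plus the two filtered key accumulators
theorem checkAltLoop_char : ∀ (items : List (Int × Int)) (t s : List Int),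
    checkAltLoop items t s =
      if items.all (fun vc => vc.2 == 3 || vc.2 == 1)
      then checkAltLoop [] (t ++ (items.filter (fun vc => vc.2 == 3)).map Prod.fst)
                          (s ++ (items.filter (fun vc => vc.2 == 1)).map Prod.fst)
      else false := by
  intro items
  induction items with
  | nil => intro t s; simp
  | cons vc rest ih =>
    intro t s
    obtain ⟨v, c⟩ := vc
    by_cases h3 : c = 3
    · simp [checkAltLoop, h3, ih]
    · by_cases h1 : c = 1
      · simp [checkAltLoop, h1, ih]
      · simp [checkAltLoop, h3, h1]

theorem check_eq (row : List Int) : check row = check_alt row := by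
  classical
  unfold check check_alt
  simp only []
  have hitems : (row.foldl (fun d x => d.insert x (d.getD x 0 + 1)) PySem.Dict.empty).items
      = (PySem.Set.ofList row).map (fun k => (k, (row.count k : Int))) := by
    rw [PySem.Dict.foldl_insert_getD_add_one_eq_counter, PySem.Dict.items_counter]
  rw [hitems, checkLoop_char, checkAltLoop_char]
  rw [List.all_map, List.filter_map, List.filter_map, List.map_map, List.map_map]
  have e_all : ((fun vc : Int × Int => vc.2 == 3 || vc.2 == 1) ∘ fun k => (k, (row.count k : Int)))
      = (fun x => row.count x == 3 || row.count x == 1) := by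
    funext x
    simp only [Function.comp]
    apply Bool.eq_iff_iff.mpr
    simp only [Bool.or_eq_true, beq_iff_eq]
    omega
  have e3 : ((fun vc : Int × Int => vc.2 == 3) ∘ fun k => (k, (row.count k : Int)))
      = (fun x => row.count x == 3) := by
    funext x; simp only [Function.comp]; apply Bool.eq_iff_iff.mpr; simp only [beq_iff_eq]; omega
  have e1 : ((fun vc : Int × Int => vc.2 == 1) ∘ fun k => (k, (row.count k : Int)))
      = (fun x => row.count x == 1) := by
    funext x; simp only [Function.comp]; apply Bool.eq_iff_iff.mpr; simp only [beq_iff_eq]; omega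
  have efst : (Prod.fst ∘ fun k : Int => (k, (row.count k : Int))) = id := by
    funext x; rfl
  rw [e_all, e3, e1, efst, List.map_id, List.map_id]
  have hall : row.all (fun x => row.count x == 3 || row.count x == 1)
      = (PySem.Set.ofList row).all (fun x => row.count x == 3 || row.count x == 1) :=
    all_eq_of_mem_iff _ _ _ (fun x => (PySem.Set.mem_ofList row x).symm)
  rw [hall]
  by_cases hcond : (PySem.Set.ofList row).all (fun x => row.count x == 3 || row.count x == 1) = true
  · rw [hcond]
    simp only [if_true, List.nil_append]
    have hu := count_len row 1
    have hp := count_len row 3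
    simp only [checkAltLoop, checkFinish]
    by_cases hs : ((PySem.Set.ofList row).filter (fun x => row.count x == 1)).length = 1
    · by_cases ht : ((PySem.Set.ofList row).filter (fun x => row.count x == 3)).length = 2
      · have hul : (row.filter (fun x => row.count x == 1)).length = 1 := by omega
        have hpl : (row.filter (fun x => row.count x == 3)).length = 6 := by omega
        have hmem3 : ∀ x, x ∈ row.filter (fun x => row.count x == 3) ↔
            x ∈ (PySem.Set.ofList row).filter (fun x => row.count x == 3) := by
          intro x; simp [List.mem_filter, PySem.Set.mem_ofList]
        have hmax : PySem.List.max? (row.filter (fun x => row.count x == 3)) (fun x => x)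
            = PySem.List.max? ((PySem.Set.ofList row).filter (fun x => row.count x == 3)) (fun x => x) := by
          apply max_eq_of_mem_iff _ _ hmem3
          intro hnil; rw [hnil] at hpl; simp at hpl
        obtain ⟨u, hu'⟩ := List.length_eq_one_iff.mp hul
        obtain ⟨s, hs'⟩ := List.length_eq_one_iff.mp hs
        have hus : u = s := by
          have hmem1 : u ∈ (PySem.Set.ofList row).filter (fun x => row.count x == 1) := by
            have : u ∈ row.filter (fun x => row.count x == 1) := by rw [hu']; simp
            simp only [List.mem_filter, PySem.Set.mem_ofList] at this ⊢
            exact this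
          rw [hs'] at hmem1; simpa using hmem1
        rw [hu', hs', hus, hmax]
        simp [hpl, ht]
      · have h6 : (row.filter (fun x => row.count x == 3)).length ≠ 6 := by omega
        have h1' : (row.filter (fun x => row.count x == 1)).length = 1 := by omega
        simp [h6, ht, h1', hs]
    · have h1' : (row.filter (fun x => row.count x == 1)).length ≠ 1 := by omega
      simp [hs, h1']
  · simp [hcond]

-- ===== VERDICT (by name: the statement is the Claim_ definition above) =====
theorem check_spec : Claim_equal_check := by
  intro row _
  exact check_eq row
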